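-- pv_equiv track=rewrite | github.com/CIT95/JorgeC_Public | w8/string_exercises.py | case4
-- ===== SOURCE A (Python) =====
-- def case4(sval):
--     slow=''
--     sup=''
--     for i in sval: #i googled the for statement
--         if i.islower() == True:
--             slow=slow+i
--         else:
--             sup=sup+i
--     return slow+sup
-- ===== SOURCE B (Python) =====
-- def case4(sval):
--     return ''.join(sorted(sval, key=lambda c: not c.islower()))
-- ===== Notes on version B (the rewrite author's own statement) =====
-- stated objective: idiomatic
-- what changed: Replaces the two-accumulator concatenation loop with a single stable sort keyed on the negated lowercase test, so lowercase chars sort first and both groups keep their original order.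
import Mathlib
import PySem

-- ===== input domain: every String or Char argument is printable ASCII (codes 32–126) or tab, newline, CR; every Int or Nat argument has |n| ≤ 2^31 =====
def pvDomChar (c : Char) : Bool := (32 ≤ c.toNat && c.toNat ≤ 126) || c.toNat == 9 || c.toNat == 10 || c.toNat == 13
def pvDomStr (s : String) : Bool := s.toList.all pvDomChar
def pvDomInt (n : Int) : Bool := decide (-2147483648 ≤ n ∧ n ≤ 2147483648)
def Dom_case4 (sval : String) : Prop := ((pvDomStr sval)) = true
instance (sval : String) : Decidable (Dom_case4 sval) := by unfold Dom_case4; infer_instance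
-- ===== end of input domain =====

-- B replaces A's two-accumulator loop by one stable sort on the boolean key "not islower" (idiomatic, same result).


-- ===== PORT A =====
-- literal port: two string accumulators slow/sup, built left-to-right, returned concatenated
def case4 (sval : String) : String :=
  let r := sval.toList.foldl
    (fun (acc : List Char × List Char) i =>
      if PySem.Chars.islower i = true then (acc.1 ++ [i], acc.2) else (acc.1, acc.2 ++ [i]))
    ([], [])
  String.mk (r.1 ++ r.2)

-- ===== PORT B =====
-- literal port of Source B: ''.join(sorted(sval, key=lambda c: not c.islower()))
def case4_alt (sval : String) : String :=
  String.mk (PySem.List.sorted sval.toList (fun c => !PySem.Chars.islower c) false)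

-- ===== PRECONDITION & SPEC =====
def Spec_case4 (sval : String) (out : String) : Prop := out = case4_alt sval
instance (sval : String) (out : String) : Decidable (Spec_case4 sval out) := by unfold Spec_case4; infer_instance

-- ===== CLAIM (what is proved, stated in full; the proofs are below) =====
def Claim_equal_case4 : Prop := ∀ (sval : String), Dom_case4 sval → Spec_case4 sval (case4 sval)

-- ===== LEMMAS AND PROOFS =====

-- A's loop = stable partition: accumulators end as slow ++ filter islower, sup ++ filter (not islower)
theorem case4_foldl_eq (xs : List Char) : ∀ (sl su : List Char),
    xs.foldl (fun (acc : List Char × List Char) i =>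
      if PySem.Chars.islower i = true then (acc.1 ++ [i], acc.2) else (acc.1, acc.2 ++ [i]))
      (sl, su)
    = (sl ++ xs.filter (fun c => PySem.Chars.islower c),
       su ++ xs.filter (fun c => !PySem.Chars.islower c)) := by
  induction xs with
  | nil => intro sl su; simp
  | cons x t ih =>
    intro sl su
    by_cases hx : PySem.Chars.islower x = true <;>
      simp [List.foldl_cons, hx, ih]

-- inserting a non-lowercase char appends it at the end
theorem insertBy_hi (x : Char) (hx : PySem.Chars.islower x = false) (L : List Char) :
    PySem.List.insertBy
      (fun a b => decide ((!PySem.Chars.islower a) < (!PySem.Chars.islower b))) x L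
    = L ++ [x] := by
  apply PySem.List.insertBy_of_forall_not_before
  intro y _
  simp [hx, Bool.lt_iff]

-- inserting a lowercase char goes right after the lowercase prefix
theorem insertBy_lo (x : Char) (hx : PySem.Chars.islower x = true) :
    ∀ (F G : List Char), (∀ a ∈ F, PySem.Chars.islower a = true) →
      (∀ a ∈ G, PySem.Chars.islower a = false) →
      PySem.List.insertBy
        (fun a b => decide ((!PySem.Chars.islower a) < (!PySem.Chars.islower b))) x (F ++ G)
      = F ++ x :: G := by
  intro F
  induction F with
  | nil =>
    intro G _ hG
    cases G with
    | nil => simp [PySem.List.insertBy]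
    | cons g t =>
      have hg := hG g (by simp)
      simp [PySem.List.insertBy, hx, hg, Bool.lt_iff]
  | cons f Ft ih =>
    intro G hF hG
    have hf := hF f (by simp)
    have hb : (decide ((!PySem.Chars.islower x) < (!PySem.Chars.islower f))) = false := by
      simp [hx, hf]
    rw [List.cons_append, PySem.List.insertBy, hb]
    simp only [Bool.false_eq_true, if_false, ih G (fun a ha => hF a (by simp [ha])) hG,
      List.cons_append]

-- the insertion-sort fold maintains "lowercase block ++ other block", each in input order
theorem sorted_partition (xs : List Char) : ∀ (F G : List Char),
    (∀ a ∈ F, PySem.Chars.islower a = true) → (∀ a ∈ G, PySem.Chars.islower a = false) →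
    xs.foldl (fun acc x =>
        PySem.List.insertBy
          (fun a b => decide ((!PySem.Chars.islower a) < (!PySem.Chars.islower b))) x acc)
      (F ++ G)
    = (F ++ xs.filter (fun c => PySem.Chars.islower c))
      ++ (G ++ xs.filter (fun c => !PySem.Chars.islower c)) := by
  induction xs with
  | nil => intro F G _ _; simp
  | cons x t ih =>
    intro F G hF hG
    by_cases hx : PySem.Chars.islower x = true
    · have h1 : PySem.List.insertBy
          (fun a b => decide ((!PySem.Chars.islower a) < (!PySem.Chars.islower b))) x (F ++ G)
          = (F ++ [x]) ++ G := by
        rw [insertBy_lo x hx F G hF hG]; simp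
      have h2 := ih (F ++ [x]) G
        (by intro a ha; rcases List.mem_append.mp ha with h | h
            · exact hF a h
            · simp at h; subst h; exact hx) hG
      simp only [List.foldl_cons, h1, h2, List.filter_cons, hx]
      simp
    · have hx' : PySem.Chars.islower x = false := by simpa using hx
      have h1 : PySem.List.insertBy
          (fun a b => decide ((!PySem.Chars.islower a) < (!PySem.Chars.islower b))) x (F ++ G)
          = F ++ (G ++ [x]) := by
        rw [insertBy_hi x hx' (F ++ G)]; simp
      have h2 := ih F (G ++ [x]) hF
        (by intro a ha; rcases List.mem_append.mp ha with h | h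
            · exact hG a h
            · simp at h; subst h; exact hx')
      simp only [List.foldl_cons, h1, h2, List.filter_cons, hx']
      simp

-- ===== VERDICT (by name: the statement is the Claim_ definition above) =====
theorem case4_spec : Claim_equal_case4 := by
  intro sval _
  unfold Spec_case4 case4 case4_alt
  rw [PySem.List.sorted_eq_foldl_insertBy]
  have h := sorted_partition sval.toList [] [] (by simp) (by simp)
  simp only [List.nil_append] at h
  rw [h, case4_foldl_eq]
  simp
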